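-- pv_equiv track=rewrite | github.com/MAFTOUH-Omar/TP-Python | TP02/Exercice03.py | verifie_ordre
-- ===== SOURCE A (Python) =====
-- def verifie_ordre(liste):
--     # Initialise une variable pour stocker si l'ordre est vérifié, initialement à False
--     order = False
--     # Initialise les clés pour les nombres 1, 2 et 3 à 0
--     cle01, cle02, cle03 = 0, 0, 0
--
--     # Parcourt chaque élément dans la liste
--     for i in range(0, len(liste)):
--         # Si l'élément est égal à 1, met à jour la clé pour 1
--         if liste[i] == 1:
--             cle01 = i
--         # Si l'élément est égal à 2, met à jour la clé pour 2
--         elif liste[i] == 2: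
--             cle02 = i
--         # Si l'élément est égal à 3, met à jour la clé pour 3
--         elif liste[i] == 3:
--             cle03 = i
--
--     # Vérifie si l'ordre est vérifié
--     if (cle01 < cle02 and cle01 < cle03) or (cle02 > cle01 and cle02 < cle03):
--         # Si les conditions sont satisfaites, met à jour la variable order à True
--         order = True
--
--     # Retourne l'indicateur d'ordre
--     return order
-- ===== SOURCE B (Python) =====
-- def verifie_ordre(liste):
--     # Backward scan: the first time we see 1/2/3 from the right is its last
--     # index from the front; stop as soon as all three have been located.
--     cle01, cle02, cle03 = 0, 0, 0
--     found1 = found2 = found3 = False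
--     i = len(liste) - 1
--     while i >= 0 and not (found1 and found2 and found3):
--         v = liste[i]
--         if v == 1 and not found1:
--             cle01, found1 = i, True
--         elif v == 2 and not found2:
--             cle02, found2 = i, True
--         elif v == 3 and not found3:
--             cle03, found3 = i, True
--         i -= 1
--     return (cle01 < cle02 and cle01 < cle03) or (cle02 > cle01 and cle02 < cle03)
-- ===== Notes on version B (the rewrite author's own statement) =====
-- stated objective: alternative
-- what changed: Replaces A's forward last-index-updating loop by a backward scan that records each of 1/2/3 the first time it is seen from the right and breaks early once all three are found; the final boolean condition is kept verbatim.
import Mathlib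
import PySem

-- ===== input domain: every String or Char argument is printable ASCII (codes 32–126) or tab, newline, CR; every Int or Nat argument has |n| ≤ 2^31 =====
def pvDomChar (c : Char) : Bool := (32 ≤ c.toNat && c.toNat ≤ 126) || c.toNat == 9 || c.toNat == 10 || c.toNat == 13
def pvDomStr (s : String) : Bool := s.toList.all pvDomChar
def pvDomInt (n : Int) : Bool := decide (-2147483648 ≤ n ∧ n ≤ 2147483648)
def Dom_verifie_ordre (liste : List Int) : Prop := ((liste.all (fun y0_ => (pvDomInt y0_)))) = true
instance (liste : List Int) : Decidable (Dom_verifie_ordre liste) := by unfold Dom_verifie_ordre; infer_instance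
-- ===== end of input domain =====

-- B replaces A's forward last-index loop by a backward scan with early exit (same final
-- boolean condition, same O(n) cost): a structurally different traversal, not a speed claim.

-- ===== PORT A =====
-- forward loop: for each (value, index) update the last-seen slot of 1/2/3
def pvStepA (c : Nat × Nat × Nat) (p : Int × Nat) : Nat × Nat × Nat :=
  if p.1 == 1 then (p.2, c.2.1, c.2.2)
  else if p.1 == 2 then (c.1, p.2, c.2.2)
  else if p.1 == 3 then (c.1, c.2.1, p.2)
  else c

def verifie_ordre (liste : List Int) : Bool :=
  let s := liste.zipIdx.foldl pvStepA (0, 0, 0)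
  (s.1 < s.2.1 && s.1 < s.2.2) || (s.2.1 > s.1 && s.2.1 < s.2.2)

-- ===== PORT B =====
-- backward scan over the (value, index) pairs in reverse; each slot carries
-- (index, found-flag); stop as soon as all three are found
def pvScanB : List (Int × Nat) → (Nat × Bool) → (Nat × Bool) → (Nat × Bool) → Nat × Nat × Nat
  | [], s1, s2, s3 => (s1.1, s2.1, s3.1)
  | (v, i) :: rest, s1, s2, s3 =>
    if s1.2 && s2.2 && s3.2 then (s1.1, s2.1, s3.1)
    else if v == 1 && !s1.2 then pvScanB rest (i, true) s2 s3
    else if v == 2 && !s2.2 then pvScanB rest s1 (i, true) s3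
    else if v == 3 && !s3.2 then pvScanB rest s1 s2 (i, true)
    else pvScanB rest s1 s2 s3

def verifie_ordre_alt (liste : List Int) : Bool :=
  let s := pvScanB liste.zipIdx.reverse (0, false) (0, false) (0, false)
  (s.1 < s.2.1 && s.1 < s.2.2) || (s.2.1 > s.1 && s.2.1 < s.2.2)

-- ===== PRECONDITION & SPEC =====
def Spec_verifie_ordre (liste : List Int) (out : Bool) : Prop := out = verifie_ordre_alt liste
instance (liste : List Int) (out : Bool) : Decidable (Spec_verifie_ordre liste out) := by unfold Spec_verifie_ordre; infer_instance

-- ===== CLAIM (what is proved, stated in full; the proofs are below) =====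
def Claim_equal_verifie_ordre : Prop := ∀ (liste : List Int), Dom_verifie_ordre liste → Spec_verifie_ordre liste (verifie_ordre liste)

-- ===== LEMMAS AND PROOFS =====

-- last index of value v in a pair list, default d (accumulator form)
def pvLastD (v : Int) (d : Nat) : List (Int × Nat) → Nat
  | [] => d
  | (w, i) :: t => pvLastD v (if w == v then i else d) t

theorem pvLastD_append (v : Int) (d : Nat) (u : List (Int × Nat)) (w : Int) (i : Nat) :
    pvLastD v d (u ++ [(w, i)]) = if w == v then i else pvLastD v d u := by
  induction u generalizing d with
  | nil => rfl
  | cons x t ih => cases x; simp [pvLastD, ih]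

theorem pvFoldA_eq (t : List (Int × Nat)) (c1 c2 c3 : Nat) :
    t.foldl pvStepA (c1, c2, c3) = (pvLastD 1 c1 t, pvLastD 2 c2 t, pvLastD 3 c3 t) := by
  induction t generalizing c1 c2 c3 with
  | nil => rfl
  | cons x t ih =>
    obtain ⟨w, i⟩ := x
    simp only [List.foldl_cons, pvStepA, pvLastD]
    by_cases h1 : w = 1
    · simp [h1, ih]
    · by_cases h2 : w = 2
      · simp [h2, ih]
      · by_cases h3 : w = 3
        · simp [h3, ih]
        · simp [h1, h2, h3, ih]

-- the backward scan returns, per slot, the carried value if found, else the last index in t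
theorem pvScanB_eq (t : List (Int × Nat)) (s1 s2 s3 : Nat × Bool) :
    pvScanB t.reverse s1 s2 s3 =
      ((if s1.2 then s1.1 else pvLastD 1 s1.1 t),
       (if s2.2 then s2.1 else pvLastD 2 s2.1 t),
       (if s3.2 then s3.1 else pvLastD 3 s3.1 t)) := by
  induction t using List.reverseRecOn generalizing s1 s2 s3 with
  | nil => cases s1; cases s2; cases s3; simp [pvScanB, pvLastD]
  | append_singleton u x ih =>
    obtain ⟨w, i⟩ := x
    obtain ⟨a1, f1⟩ := s1; obtain ⟨a2, f2⟩ := s2; obtain ⟨a3, f3⟩ := s3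
    rw [List.reverse_append]
    simp only [List.reverse_singleton, List.singleton_append, pvScanB,
      pvLastD_append]
    cases f1 <;> cases f2 <;> cases f3 <;>
      (by_cases h1 : w = 1
       · simp [h1, ih]
       · by_cases h2 : w = 2
         · simp [h2, ih]
         · by_cases h3 : w = 3 <;> simp [h1, h2, h3, ih])

-- ===== VERDICT (by name: the statement is the Claim_ definition above) =====
theorem verifie_ordre_spec : Claim_equal_verifie_ordre := by
  intro liste _
  unfold Spec_verifie_ordre verifie_ordre verifie_ordre_alt
  rw [pvFoldA_eq, pvScanB_eq]
  simp
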